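-- pv_equiv track=rewrite | github.com/draconian9908/summer18_cs | Module 1/hw1&hw2/cs35_hw2_starterfiles/hw2pr1.py | apply_headers
-- ===== SOURCE A (Python) =====
-- def apply_headers( OriginalLines ):
--     """ should apply headers, h1-h5, as tags
--     """
--     # loop for all headings: h1-h5
--     NewLines =[]
--     for line in OriginalLines:
--         if line.startswith("#####"):
--             line = "<h5>" + line[5:] + "</h5>"
--         elif line.startswith("####"):
--             line = "<h4>" + line[4:] + "</h4>"
--         elif line.startswith("###"):
--             line = "<h3>" + line[3:] + "</h3>"
--         elif line.startswith("##"):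
--             line = "<h2>" + line[2:] + "</h2>"
--         elif line.startswith("#"):
--             line = "<h1>" + line[1:] + "</h1>"
--         NewLines += [ line ]
--     return NewLines
-- ===== SOURCE B (Python) =====
-- def apply_headers(OriginalLines):
--     """ should apply headers, h1-h5, as tags """
--     def wrap(line):
--         n = min(len(line) - len(line.lstrip('#')), 5)
--         return f"<h{n}>{line[n:]}</h{n}>" if n else line
--     return [wrap(line) for line in OriginalLines]
-- ===== Notes on version B (the rewrite author's own statement) =====
-- stated objective: simpler
-- what changed: Replaces the five-branch startswith cascade with an arithmetic leading-hash count (len - len(lstrip('#')), clamped to 5) and one tag construction, and the accumulator loop with a list comprehension.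
import Mathlib
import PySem

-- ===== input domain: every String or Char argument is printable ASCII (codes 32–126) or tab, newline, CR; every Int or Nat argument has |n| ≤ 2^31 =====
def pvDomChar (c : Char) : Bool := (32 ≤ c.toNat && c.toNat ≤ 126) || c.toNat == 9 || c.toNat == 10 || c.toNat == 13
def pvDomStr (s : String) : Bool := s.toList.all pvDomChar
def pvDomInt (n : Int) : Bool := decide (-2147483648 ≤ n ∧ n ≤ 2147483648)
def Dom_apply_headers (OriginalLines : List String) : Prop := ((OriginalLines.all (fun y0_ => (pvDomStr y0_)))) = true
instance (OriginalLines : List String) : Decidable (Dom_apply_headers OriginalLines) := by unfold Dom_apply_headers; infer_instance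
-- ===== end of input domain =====

-- B replaces A's five-branch startswith cascade by counting the leading '#'s arithmetically (simpler decomposition; return value only, no mutation).

-- ===== PORT A =====
-- per-line body of A's loop: the startswith cascade (string building done on code-point lists via String.ofList, exact for str concatenation)
def pvLineA (line : String) : String :=
  let cs := line.toList
  if PySem.Chars.startswith cs ("#####".toList) then
    String.ofList ("<h5>".toList ++ PySem.List.slice cs (some (5 : Int)) none ++ "</h5>".toList)
  else if PySem.Chars.startswith cs ("####".toList) then
    String.ofList ("<h4>".toList ++ PySem.List.slice cs (some (4 : Int)) none ++ "</h4>".toList)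
  else if PySem.Chars.startswith cs ("###".toList) then
    String.ofList ("<h3>".toList ++ PySem.List.slice cs (some (3 : Int)) none ++ "</h3>".toList)
  else if PySem.Chars.startswith cs ("##".toList) then
    String.ofList ("<h2>".toList ++ PySem.List.slice cs (some (2 : Int)) none ++ "</h2>".toList)
  else if PySem.Chars.startswith cs ("#".toList) then
    String.ofList ("<h1>".toList ++ PySem.List.slice cs (some (1 : Int)) none ++ "</h1>".toList)
  else line

def apply_headers (OriginalLines : List String) : List String :=
  OriginalLines.foldl (fun NewLines line => NewLines ++ [pvLineA line]) []

-- ===== PORT B =====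
-- len(line) - len(line.lstrip('#')): lstrip with the single char '#' is exactly dropWhile (· == '#')
def pvHashLen (cs : List Char) : Nat := cs.length - (cs.dropWhile (fun c => c == '#')).length

-- per-line wrap of B: count leading hashes, clamp to 5, build the tag once (f-string built on code-point lists)
def pvLineB (line : String) : String :=
  let m := min (pvHashLen line.toList) 5
  if m = 0 then line
  else String.ofList (('<' :: 'h' :: PySem.Int.toChars (m : Int) ++ ['>'])
        ++ line.toList.drop m
        ++ ('<' :: '/' :: 'h' :: PySem.Int.toChars (m : Int) ++ ['>']))

def apply_headers_alt (OriginalLines : List String) : List String :=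
  OriginalLines.map pvLineB

-- ===== PRECONDITION & SPEC =====
def Spec_apply_headers (OriginalLines : List String) (out : List String) : Prop := out = apply_headers_alt OriginalLines
instance (OriginalLines : List String) (out : List String) : Decidable (Spec_apply_headers OriginalLines out) := by unfold Spec_apply_headers; infer_instance

-- ===== CLAIM (what is proved, stated in full; the proofs are below) =====
def Claim_equal_apply_headers : Prop := ∀ (OriginalLines : List String), Dom_apply_headers OriginalLines → Spec_apply_headers OriginalLines (apply_headers OriginalLines)

-- ===== LEMMAS AND PROOFS =====

lemma pv_repl_prefix (cs : List Char) (k : Nat) :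
    List.replicate k '#' <+: cs ↔ k ≤ (cs.takeWhile (fun c => c == '#')).length := by
  induction k generalizing cs with
  | zero => simp
  | succ k ih =>
    cases cs with
    | nil => simp [List.replicate_succ]
    | cons c cs =>
      by_cases h : c = '#'
      · simp [List.replicate_succ, h, ih]
      · simp [List.replicate_succ, h, Ne.symm h]

lemma pv_hashLen_eq (cs : List Char) :
    pvHashLen cs = (cs.takeWhile (fun c => c == '#')).length := by
  have h := List.takeWhile_append_dropWhile (p := fun c => c == '#') (l := cs)
  have := congrArg List.length h
  simp only [List.length_append] at this
  unfold pvHashLen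
  omega

lemma pv_line_eq (line : String) : pvLineA line = pvLineB line := by
  have e5 : ("#####".toList : List Char) = List.replicate 5 '#' := by decide
  have e4 : ("####".toList : List Char) = List.replicate 4 '#' := by decide
  have e3 : ("###".toList : List Char) = List.replicate 3 '#' := by decide
  have e2 : ("##".toList : List Char) = List.replicate 2 '#' := by decide
  have e1 : ("#".toList : List Char) = List.replicate 1 '#' := by decide
  have hs : ∀ k : Nat, (PySem.Chars.startswith line.toList (List.replicate k '#') = true)
      ↔ k ≤ (line.toList.takeWhile (fun c => c == '#')).length := fun k => by
    rw [PySem.Chars.startswith_iff, pv_repl_prefix]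
  simp only [pvLineA, pvLineB, e5, e4, e3, e2, e1, pv_hashLen_eq]
  set t := (line.toList.takeWhile (fun c => c == '#')).length with ht
  by_cases c5 : 5 ≤ t
  · rw [if_pos ((hs 5).mpr c5)]
    have hsl : PySem.List.slice line.toList (some (5:Int)) none = List.drop 5 line.toList := by
      simp [pysem]
    have htc : PySem.Int.toChars (5:Int) = ['5'] := by decide
    have hm : min t 5 = 5 := by omega
    simp [hm, hsl, htc]
  · rw [if_neg (by rw [hs 5]; omega)]
    by_cases c4 : 4 ≤ t
    · rw [if_pos ((hs 4).mpr c4)]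
      have hsl : PySem.List.slice line.toList (some (4:Int)) none = List.drop 4 line.toList := by
        simp [pysem]
      have htc : PySem.Int.toChars (4:Int) = ['4'] := by decide
      have hm : min t 5 = 4 := by omega
      simp [hm, hsl, htc]
    · rw [if_neg (by rw [hs 4]; omega)]
      by_cases c3 : 3 ≤ t
      · rw [if_pos ((hs 3).mpr c3)]
        have hsl : PySem.List.slice line.toList (some (3:Int)) none = List.drop 3 line.toList := by
          simp [pysem]
        have htc : PySem.Int.toChars (3:Int) = ['3'] := by decide
        have hm : min t 5 = 3 := by omega
        simp [hm, hsl, htc]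
      · rw [if_neg (by rw [hs 3]; omega)]
        by_cases c2 : 2 ≤ t
        · rw [if_pos ((hs 2).mpr c2)]
          have hsl : PySem.List.slice line.toList (some (2:Int)) none = List.drop 2 line.toList := by
            simp [pysem]
          have htc : PySem.Int.toChars (2:Int) = ['2'] := by decide
          have hm : min t 5 = 2 := by omega
          simp [hm, hsl, htc]
        · rw [if_neg (by rw [hs 2]; omega)]
          by_cases c1 : 1 ≤ t
          · rw [if_pos ((hs 1).mpr c1)]
            have hsl : PySem.List.slice line.toList (some (1:Int)) none = List.drop 1 line.toList := by
              simp [pysem]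
            have htc : PySem.Int.toChars (1:Int) = ['1'] := by decide
            have hm : min t 5 = 1 := by omega
            simp [hm, hsl, htc]
          · rw [if_neg (by rw [hs 1]; omega)]
            have hm : min t 5 = 0 := by omega
            simp [hm]

theorem apply_headers_spec : Claim_equal_apply_headers := by
  intro xs _
  unfold Spec_apply_headers apply_headers apply_headers_alt
  rw [PySem.List.foldl_append_singleton_eq_map]
  exact List.map_congr_left (fun l _ => pv_line_eq l)
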